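-- pv_equiv track=rewrite | github.com/svaans/bot | core/gestor_warmup.py | _validar_contiguo
-- ===== SOURCE A (Python) =====
-- from typing import Any, Callable, Dict, Iterable, List, Optional
--
-- def _validar_contiguo(velas: List[dict], base_ms: int) -> bool:
--     if len(velas) < 2:
--         return True
--     ts = [int(v["timestamp"]) for v in velas]
--     for a, b in zip(ts, ts[1:]):
--         if b - a != base_ms:
--             return False
--     return True
-- ===== SOURCE B (Python) =====
-- def _validar_contiguo(velas, base_ms):
--     if len(velas) < 2:
--         return True
--     ts = [int(v["timestamp"]) for v in velas]
--     t0 = ts[0]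
--     return all(t == t0 + i * base_ms for i, t in enumerate(ts))
-- ===== Notes on version B (the rewrite author's own statement) =====
-- stated objective: alternative
-- what changed: B checks each timestamp against the closed-form expected value ts[0] + i*base_ms by index instead of comparing consecutive differences pairwise.
import Mathlib
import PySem

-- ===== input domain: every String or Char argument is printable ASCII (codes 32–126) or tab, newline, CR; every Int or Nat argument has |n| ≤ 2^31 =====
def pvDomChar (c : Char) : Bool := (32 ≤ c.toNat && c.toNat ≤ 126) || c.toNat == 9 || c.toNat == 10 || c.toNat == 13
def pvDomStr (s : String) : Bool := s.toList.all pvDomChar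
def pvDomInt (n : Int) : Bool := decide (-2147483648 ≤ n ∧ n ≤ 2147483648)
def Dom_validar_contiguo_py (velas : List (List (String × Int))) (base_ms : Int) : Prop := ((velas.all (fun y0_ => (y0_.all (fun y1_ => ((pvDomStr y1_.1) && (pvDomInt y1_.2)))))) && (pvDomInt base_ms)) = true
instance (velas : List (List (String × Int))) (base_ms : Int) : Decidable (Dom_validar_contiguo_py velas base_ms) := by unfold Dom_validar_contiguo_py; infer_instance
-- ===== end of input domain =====

-- B re-checks the series against the closed-form expected timestamp ts[0] + i*base_ms instead of
-- comparing consecutive differences; same O(n) cost, return-value equivalence proved on Pre_.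

-- ===== PORT A =====
-- ts = [int(v["timestamp"]) for v in velas]  (KeyError = none)
def tsA (velas : List (List (String × Int))) : Option (List Int) :=
  velas.mapM (fun v => (PySem.Dict.mk v).get? "timestamp")

-- for a, b in zip(ts, ts[1:]): if b - a != base_ms: return False
def loopA (base_ms : Int) : List Int → Bool
  | a :: b :: rest => if b - a ≠ base_ms then false else loopA base_ms (b :: rest)
  | _ => true

def validar_contiguo_py (velas : List (List (String × Int))) (base_ms : Int) : Bool :=
  if velas.length < 2 then true
  else
    match tsA velas with
    | none => false   -- unreachable under Pre_ (KeyError)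
    | some ts => loopA base_ms ts

-- ===== PORT B =====
def tsB : List (List (String × Int)) → Option (List Int)
  | [] => some []
  | v :: rest =>
    match (PySem.Dict.mk v).get? "timestamp", tsB rest with
    | some t, some ts => some (t :: ts)
    | _, _ => none

def validar_contiguo_py_alt (velas : List (List (String × Int))) (base_ms : Int) : Bool :=
  if velas.length < 2 then true
  else
    match tsB velas with
    | none => false   -- unreachable under Pre_ (KeyError)
    | some [] => true
    | some (t0 :: rest) =>
      (PySem.List.enumerate (t0 :: rest) 0).all (fun p => p.2 == t0 + p.1 * base_ms)

-- ===== PRECONDITION & SPEC =====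
-- Pre_ excludes exactly the inputs where A raises KeyError: two or more candles and some candle without a "timestamp" key.
def Pre_validar_contiguo_py (velas : List (List (String × Int))) (base_ms : Int) : Prop :=
  velas.length < 2 ∨ ∀ v ∈ velas, "timestamp" ∈ v.map Prod.fst
instance (velas : List (List (String × Int))) (base_ms : Int) : Decidable (Pre_validar_contiguo_py velas base_ms) := by unfold Pre_validar_contiguo_py; infer_instance

def pvWitness_validar_contiguo_py : (List (List (String × Int))) × Int :=
  ([[("timestamp", 10)], [("timestamp", 15)], [("timestamp", 20)]], 5)

def Spec_validar_contiguo_py (velas : List (List (String × Int))) (base_ms : Int) (out : Bool) : Prop := out = validar_contiguo_py_alt velas base_ms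
instance (velas : List (List (String × Int))) (base_ms : Int) (out : Bool) : Decidable (Spec_validar_contiguo_py velas base_ms out) := by unfold Spec_validar_contiguo_py; infer_instance

-- ===== CLAIM (what is proved, stated in full; the proofs are below) =====
def Claim_equal_validar_contiguo_py : Prop := ∀ (velas : List (List (String × Int))) (base_ms : Int), Dom_validar_contiguo_py velas base_ms → Pre_validar_contiguo_py velas base_ms → Spec_validar_contiguo_py velas base_ms (validar_contiguo_py velas base_ms)

-- ===== LEMMAS AND PROOFS =====

theorem tsA_eq_tsB (velas : List (List (String × Int))) : tsA velas = tsB velas := by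
  induction velas with
  | nil => rfl
  | cons v rest ih =>
    unfold tsA at ih ⊢
    rw [List.mapM_cons, ih]
    cases h : (PySem.Dict.mk v).get? "timestamp" <;> cases h2 : tsB rest <;>
      simp [tsB, h, h2]

theorem tsB_isSome (velas : List (List (String × Int)))
    (h : ∀ v ∈ velas, "timestamp" ∈ v.map Prod.fst) : ∃ ts, tsB velas = some ts ∧ ts.length = velas.length := by
  induction velas with
  | nil => exact ⟨[], rfl, rfl⟩
  | cons v rest ih =>
    obtain ⟨ts, hts, hlen⟩ := ih (fun w hw => h w (List.mem_cons_of_mem _ hw))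
    have hk : "timestamp" ∈ v.map Prod.fst := h v (List.mem_cons_self ..)
    have : ((PySem.Dict.mk v).get? "timestamp").isSome := by
      rw [Option.isSome_iff_ne_none, Ne, PySem.Dict.get?_eq_none_iff_not_mem_keys]
      simpa [PySem.Dict.keys_mk] using hk
    obtain ⟨t, ht⟩ := Option.isSome_iff_exists.mp this
    exact ⟨t :: ts, by simp [tsB, ht, hts], by simp [hlen]⟩

theorem loop_eq_enum (base_ms t0 : Int) (rest : List Int) (a : Int) (k : Int)
    (ha : a = t0 + k * base_ms) :
    loopA base_ms (a :: rest)
      = (PySem.List.enumerate (a :: rest) k).all (fun p => p.2 == t0 + p.1 * base_ms) := by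
  induction rest generalizing a k with
  | nil => simp [loopA, PySem.List.enumerate_cons, PySem.List.enumerate_nil, ha]
  | cons b rest ih =>
    rw [PySem.List.enumerate_cons]
    by_cases hb : b - a = base_ms
    · have hb' : b = t0 + (k + 1) * base_ms := by rw [ha] at hb; linear_combination hb
      simp only [loopA]
      rw [if_neg (not_not_intro hb), ih b (k + 1) hb']
      simp [List.all_cons, ha]
    · have hb' : b ≠ t0 + (k + 1) * base_ms := fun h => hb (by rw [h, ha]; ring)
      simp only [loopA, if_pos hb]
      rw [PySem.List.enumerate_cons]
      simp [List.all_cons, hb']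

-- ===== VERDICT (by name: the statement is the Claim_ definition above) =====
theorem validar_contiguo_py_spec : Claim_equal_validar_contiguo_py := by
  intro velas base_ms _ hpre
  unfold Spec_validar_contiguo_py validar_contiguo_py validar_contiguo_py_alt
  by_cases hlen : velas.length < 2
  · simp [hlen]
  · rcases hpre with h | h
    · exact absurd h hlen
    obtain ⟨ts, hts, hl⟩ := tsB_isSome velas h
    rw [if_neg hlen, if_neg hlen, tsA_eq_tsB, hts]
    match ts, hl with
    | [], hl => simp [loopA]
    | t0 :: rest, _ => exact loop_eq_enum base_ms t0 rest t0 0 (by ring)
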